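-- pv_equiv track=rewrite | github.com/jgilles23/projectEuler | pe175.py | n_to_zipped
-- ===== SOURCE A (Python) =====
-- def n_to_zipped(n):
--     binary = bin(n)[2:]
--     stream = [0]
--     state = 0
--     for b in binary[::-1]:
--         if int(b) == state:
--             stream[-1] += 1
--         else:
--             stream.append(1)
--             state = (state + 1) % 2
--     zipped = [(x,y) for x,y in zip(stream[0::2], stream[1::2])]
--     return zipped
-- ===== SOURCE B (Python) =====
-- # Run-length decomposition of the reversed binary string (recursive runs),
-- # a prepended 0 when the lowest bit is 1, then iterator pairing.
-- def _runs(s):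
--     if not s:
--         return []
--     k = 1
--     while k < len(s) and s[k] == s[0]:
--         k += 1
--     return [(s[0], k)] + _runs(s[k:])
--
-- def n_to_zipped(n):
--     rev = bin(n)[2:][::-1]
--     runs = _runs(rev)
--     counts = ([0] if runs and runs[0][0] == '1' else []) + [c for _, c in runs]
--     it = iter(counts)
--     return list(zip(it, it))
-- ===== Notes on version B (the rewrite author's own statement) =====
-- stated objective: alternative
-- what changed: A's single pass with a toggling state variable that mutates the last stream entry is replaced by a recursive run-length decomposition of the reversed binary string, a prepended 0 when the first run is of 1s, and iterator pairing instead of slice-pairing.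
import Mathlib
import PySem

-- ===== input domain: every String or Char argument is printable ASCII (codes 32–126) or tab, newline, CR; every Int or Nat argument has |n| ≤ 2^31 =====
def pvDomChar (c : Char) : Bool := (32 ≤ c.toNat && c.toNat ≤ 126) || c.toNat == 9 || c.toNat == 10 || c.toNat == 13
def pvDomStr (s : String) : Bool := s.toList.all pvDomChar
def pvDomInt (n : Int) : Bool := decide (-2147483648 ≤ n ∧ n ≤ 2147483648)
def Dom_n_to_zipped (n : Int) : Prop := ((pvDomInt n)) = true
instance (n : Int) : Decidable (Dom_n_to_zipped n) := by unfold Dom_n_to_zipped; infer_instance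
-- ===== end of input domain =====

-- B replaces A's stateful toggle fold by a recursive run-length decomposition plus pairing; equal on all n ≥ 0 (A raises ValueError on n < 0).

-- Shared helper for `bin(n)[2:]` (n ≥ 0): binNat is the binary digits LSB-first ([] for 0),
-- binChars is Python's bin string (MSB-first, "0" for 0) as a char list. Exact for n ≥ 0.
-- structural fuel recursion (fuel = m bounds the number of halvings; exact for every m)
def binNatAux : Nat → Nat → List Char
  | _, 0 => []
  | 0, _ => []
  | fuel+1, m+1 => (if (m+1) % 2 = 0 then '0' else '1') :: binNatAux fuel ((m+1)/2)

def binNat (m : Nat) : List Char := binNatAux m m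

def binChars (m : Nat) : List Char := if m = 0 then ['0'] else (binNat m).reverse

-- ===== PORT A =====
-- int(b) for the chars '0'/'1' that bin produces (exact there)
def cv (b : Char) : Int := if b = '0' then 0 else 1

-- stream[-1] += 1
def incLast : List Int → List Int
  | [] => []
  | [x] => [x + 1]
  | x :: y :: xs => x :: incLast (y :: xs)

-- one iteration of A's for-loop over (stream, state)
def aStep (st : List Int × Int) (b : Char) : List Int × Int :=
  if cv b = st.2 then (incLast st.1, st.2)
  else (st.1 ++ [1], PySem.Int.mod (st.2 + 1) 2)

-- stream[0::2] and stream[1::2]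
mutual
def evens : List Int → List Int
  | [] => []
  | x :: xs => x :: odds xs
def odds : List Int → List Int
  | [] => []
  | _ :: xs => evens xs
end

def n_to_zipped (n : Int) : List (Int × Int) :=
  let binary := binChars n.toNat          -- bin(n)[2:]
  let res := binary.reverse.foldl aStep ([0], 0)
  (evens res.1).zip (odds res.1)          -- [(x,y) for x,y in zip(stream[0::2], stream[1::2])]

-- ===== PORT B =====
-- _runs: the inner while loop counts the leading chars equal to s[0]
def spanLen (c : Char) : List Char → Nat
  | [] => 0
  | x :: xs => if x = c then 1 + spanLen c xs else 0

-- structural fuel recursion (fuel = length of the list; exact: each run is nonempty)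
def runsBAux : Nat → List Char → List (Char × Int)
  | _, [] => []
  | 0, _ :: _ => []
  | fuel+1, c :: cs =>
    let k := spanLen c cs
    (c, (1 + k : Int)) :: runsBAux fuel (cs.drop k)

def runsB (l : List Char) : List (Char × Int) := runsBAux l.length l

-- list(zip(it, it)) over a single iterator: consecutive pairing
def pairUp : List Int → List (Int × Int)
  | a :: b :: r => (a, b) :: pairUp r
  | _ => []

def n_to_zipped_alt (n : Int) : List (Int × Int) :=
  let rev := (binChars n.toNat).reverse   -- bin(n)[2:][::-1]
  let runs := runsB rev
  let counts :=
    (match runs with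
     | (c, _) :: _ => if c = '1' then [(0 : Int)] else []
     | [] => []) ++ runs.map (·.2)
  pairUp counts

-- ===== PRECONDITION & SPEC =====
-- Pre_ excludes n < 0, where A raises ValueError (int('b') on bin(n)[2:] = 'b...').
def Pre_n_to_zipped (n : Int) : Prop := 0 ≤ n
instance (n : Int) : Decidable (Pre_n_to_zipped n) := by unfold Pre_n_to_zipped; infer_instance
def pvWitness_n_to_zipped : Int := 175

def Spec_n_to_zipped (n : Int) (out : List (Int × Int)) : Prop := out = n_to_zipped_alt n
instance (n : Int) (out : List (Int × Int)) : Decidable (Spec_n_to_zipped n out) := by unfold Spec_n_to_zipped; infer_instance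

-- ===== CLAIM (what is proved, stated in full; the proofs are below) =====
def Claim_equal_n_to_zipped : Prop := ∀ (n : Int), Dom_n_to_zipped n → Pre_n_to_zipped n → Spec_n_to_zipped n (n_to_zipped n)

-- ===== LEMMAS AND PROOFS =====

def allBin (l : List Char) : Prop := ∀ c ∈ l, c = '0' ∨ c = '1'

lemma allBin_binNatAux : ∀ (fuel m : Nat), allBin (binNatAux fuel m) := by
  intro fuel
  induction fuel with
  | zero => intro m c hc; cases m <;> simp [binNatAux] at hc
  | succ f ih =>
      intro m c hc
      cases m with
      | zero => simp [binNatAux] at hc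
      | succ k =>
          simp only [binNatAux, List.mem_cons] at hc
          rcases hc with h | h
          · subst h; split <;> simp
          · exact ih _ c h

lemma allBin_binNat (m : Nat) : allBin (binNat m) := allBin_binNatAux m m

lemma allBin_rev_binChars (m : Nat) : allBin (binChars m).reverse := by
  intro c hc
  unfold binChars at hc
  split at hc
  · simp at hc; simp [hc]
  · simp at hc; exact allBin_binNat m c hc

lemma rev_binChars_ne_nil (m : Nat) : (binChars m).reverse ≠ [] := by
  unfold binChars
  split
  · simp
  · next h =>
      cases hm : m with
      | zero => exact absurd hm h
      | succ k => simp [binNat, binNatAux]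

-- A's loop, characterised: streamFrom c s l is the rest of the stream when the
-- current (last) counter is c and the state is s.
def streamFrom : Int → Int → List Char → List Int
  | c, _, [] => [c]
  | c, s, x :: xs =>
    if cv x = s then streamFrom (c+1) s xs
    else c :: streamFrom 1 (PySem.Int.mod (s + 1) 2) xs

lemma incLast_append (c : Int) : ∀ (acc : List Int), incLast (acc ++ [c]) = acc ++ [c + 1] := by
  intro acc
  induction acc with
  | nil => rfl
  | cons a as ih => cases as <;> simp_all [incLast]

lemma foldA (l : List Char) : ∀ (acc : List Int) (c s : Int),
    (l.foldl aStep (acc ++ [c], s)).1 = acc ++ streamFrom c s l := by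
  induction l with
  | nil => intro acc c s; simp [streamFrom]
  | cons x xs ih =>
      intro acc c s
      simp only [List.foldl_cons, streamFrom, aStep]
      by_cases h : cv x = s
      · simp only [h, if_true, incLast_append]
        exact ih acc (c+1) s
      · simp only [if_neg h]
        rw [ih (acc ++ [c]) 1 (PySem.Int.mod (s+1) 2)]
        simp

-- after the inner run is absorbed
lemma sf_absorb (x : Char) : ∀ (cs : List Char) (a : Int),
    streamFrom a (cv x) (x :: cs)
      = streamFrom (a + 1 + (spanLen x cs : Int)) (cv x) (cs.drop (spanLen x cs)) := by
  intro cs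
  induction cs with
  | nil => intro a; simp [streamFrom, spanLen]
  | cons y ys ih =>
      intro a
      by_cases h : y = x
      · subst h
        have h1 : streamFrom a (cv y) (y :: y :: ys) = streamFrom (a+1) (cv y) (y :: ys) := by
          simp [streamFrom]
        have hsp : spanLen y (y :: ys) = spanLen y ys + 1 := by
          simp [spanLen]; omega
        rw [h1, ih (a+1), hsp, List.drop_succ_cons]
        congr 1
        push_cast; ring
      · have h0 : spanLen x (y :: ys) = 0 := by simp [spanLen, h]
        rw [h0]
        simp [streamFrom]

lemma drop_span_head (x : Char) : ∀ (cs : List Char),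
    cs.drop (spanLen x cs) = [] ∨ ∃ y ys, cs.drop (spanLen x cs) = y :: ys ∧ y ≠ x := by
  intro cs
  induction cs with
  | nil => left; rfl
  | cons z zs ih =>
      by_cases h : z = x
      · subst h
        have hsp : spanLen z (z :: zs) = spanLen z zs + 1 := by
          simp [spanLen]; omega
        rw [hsp, List.drop_succ_cons]
        exact ih
      · right
        exact ⟨z, zs, by simp [spanLen, h], h⟩

lemma cv_toggle {x y : Char} (hx : x = '0' ∨ x = '1') (hy : y = '0' ∨ y = '1')
    (hne : y ≠ x) : cv y ≠ cv x ∧ PySem.Int.mod (cv x + 1) 2 = cv y := by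
  rcases hx with h1 | h1 <;> rcases hy with h2 | h2 <;> subst h1 <;> subst h2 <;>
    first
      | exact absurd rfl hne
      | exact ⟨by decide, by decide⟩

lemma runsBAux_fuel : ∀ (fuel : Nat) (l : List Char), l.length ≤ fuel →
    runsBAux fuel l = runsBAux l.length l := by
  intro fuel
  induction fuel using Nat.strong_induction_on with
  | _ fuel ih =>
      intro l hl
      cases l with
      | nil => cases fuel <;> rfl
      | cons c cs =>
          cases fuel with
          | zero => simp at hl
          | succ f =>
              simp only [runsBAux, List.length_cons]
              congr 1
              have hdl : (cs.drop (spanLen c cs)).length ≤ cs.length := by simp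
              have h1 := ih f (by omega) (cs.drop (spanLen c cs)) (by simp at hl ⊢; omega)
              have h2 := ih cs.length (by simp at hl; omega) (cs.drop (spanLen c cs)) hdl
              rw [h1, h2]

lemma runsB_cons (x : Char) (cs : List Char) :
    runsB (x :: cs) = (x, (1 + (spanLen x cs : Nat) : Int)) :: runsB (cs.drop (spanLen x cs)) := by
  unfold runsB
  simp only [List.length_cons, runsBAux]
  exact congrArg _ (runsBAux_fuel cs.length _ (by simp))

def addFirst (a : Int) : List Int → List Int
  | [] => []
  | k :: ks => (a + k) :: ks

lemma addFirst_zero : ∀ (l : List Int), addFirst 0 l = l := by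
  intro l; cases l <;> simp [addFirst]

lemma key : ∀ (N : Nat) (l : List Char), l.length ≤ N → allBin l →
    ∀ (x : Char) (cs : List Char) (a : Int), l = x :: cs →
    streamFrom a (cv x) l = addFirst a ((runsB l).map (·.2)) := by
  intro N
  induction N with
  | zero => intro l hl _ x cs a he; subst he; simp at hl
  | succ N ih =>
      intro l hl hbin x cs a he
      subst he
      rw [sf_absorb x cs a, runsB_cons]
      rcases drop_span_head x cs with hnil | ⟨y, ys, hd, hne⟩
      · rw [hnil]
        have h0 : runsB ([] : List Char) = [] := rfl
        simp [streamFrom, addFirst, h0, add_assoc]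
      · rw [hd]
        have hy : y = '0' ∨ y = '1' := by
          apply hbin
          have : y ∈ cs.drop (spanLen x cs) := by rw [hd]; simp
          exact List.mem_cons_of_mem x (List.drop_subset _ _ this)
        have hx : x = '0' ∨ x = '1' := hbin x (by simp)
        obtain ⟨hcv, htog⟩ := cv_toggle hx hy hne
        have hmis : streamFrom (a + 1 + (spanLen x cs : Int)) (cv x) (y :: ys)
            = (a + 1 + (spanLen x cs : Int)) :: streamFrom 1 (PySem.Int.mod (cv x + 1) 2) ys := by
          simp [streamFrom, hcv]
        have hstep : streamFrom 0 (cv y) (y :: ys) = streamFrom 1 (cv y) ys := by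
          simp [streamFrom]
        have hlen : (y :: ys).length ≤ N := by
          have h2 := congrArg List.length hd
          simp only [List.length_drop, List.length_cons] at h2 hl ⊢
          omega
        have hbin' : allBin (y :: ys) := by
          intro c hc
          apply hbin
          have : c ∈ cs.drop (spanLen x cs) := by rw [hd]; exact hc
          exact List.mem_cons_of_mem x (List.drop_subset _ _ this)
        have hkey := ih (y :: ys) hlen hbin' y ys 0 rfl
        rw [hmis, htog, ← hstep, hkey, addFirst_zero]
        simp [addFirst]
        ring

lemma zip_eo : ∀ (s : List Int), (evens s).zip (odds s) = pairUp s
  | [] => by simp [evens, odds, pairUp]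
  | [a] => by simp [evens, odds, pairUp]
  | a :: b :: r => by simp [evens, odds, pairUp, zip_eo r]

-- ===== VERDICT (by name: the statement is the Claim_ definition above) =====
theorem n_to_zipped_spec : Claim_equal_n_to_zipped := by
  intro n _ _
  unfold Spec_n_to_zipped n_to_zipped n_to_zipped_alt
  simp only
  have hbin : allBin (binChars n.toNat).reverse := allBin_rev_binChars n.toNat
  have hne : (binChars n.toNat).reverse ≠ [] := rev_binChars_ne_nil n.toNat
  rw [zip_eo]
  congr 1
  have hfold : (((binChars n.toNat).reverse).foldl aStep ([0], 0)).1
      = streamFrom 0 0 (binChars n.toNat).reverse := by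
    have := foldA (binChars n.toNat).reverse [] 0 0
    simpa using this
  rw [hfold]
  obtain ⟨x, cs, hxcs⟩ := List.exists_cons_of_ne_nil hne
  have hx : x = '0' ∨ x = '1' := hbin x (by rw [hxcs]; simp)
  have hkey := key (x :: cs).length (x :: cs) le_rfl (hxcs ▸ hbin) x cs 0 rfl
  rw [hxcs]
  rcases hx with h0 | h1
  · -- first run is of '0's: state already matches, no prepended 0
    have hcv : cv x = 0 := by rw [h0]; rfl
    rw [hcv] at hkey
    rw [hkey, addFirst_zero, runsB_cons]
    simp [h0]
  · -- first run is of '1's: mismatch prepends the 0 count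
    have hcv : cv x = 1 := by rw [h1]; rfl
    have hmis : streamFrom 0 0 (x :: cs) = 0 :: streamFrom 1 1 cs := by
      simp [streamFrom, hcv]
    have hstep : streamFrom 0 (cv x) (x :: cs) = streamFrom 1 (cv x) cs := by
      simp [streamFrom]
    rw [hcv] at hkey hstep
    rw [hmis, ← hstep, hkey, addFirst_zero, runsB_cons]
    simp [h1]
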